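-- pv_equiv track=rewrite | github.com/gieseladev/aiowamp | aiowamp/uri.py | wildcard_match
-- ===== SOURCE A (Python) =====
-- def wildcard_match(uri: str, wildcard: str) -> bool:
--     """Check if the URI matches the wildcard.
--
--     Wildcards have empty URI components which can match anything
--     (apart from '.').
--
--     Args:
--         uri: URI to be checked.
--         wildcard: Wildcard to check against.
--
--     Returns:
--         Whether the URI matches the wildcard.
--     """
--     parts = uri.split(".")
--     wc_parts = wildcard.split(".")
--
--     if len(parts) != len(wc_parts):
--         return False
--
--     for part, wc_part in zip(parts, wc_parts):
--         if wc_part and wc_part != part: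
--             return False
--
--     return True
-- ===== SOURCE B (Python) =====
-- def wildcard_match(uri: str, wildcard: str) -> bool:
--     """Simultaneous component-by-component scan of uri and wildcard,
--     without building the split lists."""
--     u, w = uri, wildcard
--     while True:
--         iu, iw = u.find("."), w.find(".")
--         uc = u[:iu] if iu >= 0 else u
--         wc = w[:iw] if iw >= 0 else w
--         if wc and wc != uc:
--             return False
--         if iu < 0 or iw < 0:
--             return iu < 0 and iw < 0
--         u, w = u[iu + 1:], w[iw + 1:]
-- ===== Notes on version B (the rewrite author's own statement) =====
-- stated objective: alternative
-- what changed: Replaced split-both-strings-into-lists, length check and zip loop by a single simultaneous two-pointer scan that compares one component of each string at a time and never materialises the split lists.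
import Mathlib
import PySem

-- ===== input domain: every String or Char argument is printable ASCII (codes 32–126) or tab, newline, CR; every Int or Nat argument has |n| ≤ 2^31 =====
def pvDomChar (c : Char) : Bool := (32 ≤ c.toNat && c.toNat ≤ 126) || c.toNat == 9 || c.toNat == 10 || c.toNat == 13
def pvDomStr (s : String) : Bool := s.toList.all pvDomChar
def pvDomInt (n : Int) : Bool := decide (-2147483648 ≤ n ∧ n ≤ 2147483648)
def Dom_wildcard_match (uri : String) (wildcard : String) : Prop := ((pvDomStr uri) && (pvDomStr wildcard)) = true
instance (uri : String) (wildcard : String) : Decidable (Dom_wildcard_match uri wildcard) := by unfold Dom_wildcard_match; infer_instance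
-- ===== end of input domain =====

-- B replaces A's split-both-strings + length check + zip loop by a single simultaneous
-- component-by-component scan of the two strings (alternative structure, same cost).

-- ===== PORT A =====
-- the 'for part, wc_part in zip(parts, wc_parts)' loop with its early return
def pvLoopA : List (List Char × List Char) → Bool
  | [] => true
  | (part, wc_part) :: rest =>
      if ¬wc_part.isEmpty ∧ wc_part ≠ part then false else pvLoopA rest

def wildcard_match (uri : String) (wildcard : String) : Bool :=
  let parts := PySem.Chars.splitOn uri.toList ['.']
  let wc_parts := PySem.Chars.splitOn wildcard.toList ['.']
  if parts.length ≠ wc_parts.length then false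
  else pvLoopA (parts.zip wc_parts)

-- ===== PORT B =====
-- Source B's while loop: u[:iu] / w[:iw] (the component before the first '.') are the
-- takeWhile parts, 'iu < 0' (no '.' left) is the dropWhile part being empty, and
-- u[iu+1:] is the tail of the dropWhile part.
def pvScan (u w : List Char) : Bool :=
  let uc := u.takeWhile (· ≠ '.')
  let wc := w.takeWhile (· ≠ '.')
  if ¬wc.isEmpty ∧ wc ≠ uc then false
  else
    match hu : u.dropWhile (· ≠ '.'), w.dropWhile (· ≠ '.') with
    | [], [] => true
    | [], _ :: _ => false
    | _ :: _, [] => false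
    | _ :: ur, _ :: wr => pvScan ur wr
termination_by u.length
decreasing_by
  have h := List.length_dropWhile_le (p := fun c => decide (c ≠ '.')) (l := u)
  rw [hu] at h
  simp at h
  omega

def wildcard_match_alt (uri : String) (wildcard : String) : Bool :=
  pvScan uri.toList wildcard.toList

-- ===== PRECONDITION & SPEC =====
def Spec_wildcard_match (uri : String) (wildcard : String) (out : Bool) : Prop := out = wildcard_match_alt uri wildcard
instance (uri : String) (wildcard : String) (out : Bool) : Decidable (Spec_wildcard_match uri wildcard out) := by unfold Spec_wildcard_match; infer_instance

-- ===== CLAIM (what is proved, stated in full; the proofs are below) =====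
def Claim_equal_wildcard_match : Prop := ∀ (uri : String) (wildcard : String), Dom_wildcard_match uri wildcard → Spec_wildcard_match uri wildcard (wildcard_match uri wildcard)

-- ===== LEMMAS AND PROOFS =====

-- structural description of splitting on '.'
def splitDot : List Char → List (List Char)
  | [] => [[]]
  | c :: rest => if c = '.' then [] :: splitDot rest else (splitDot rest).modifyHead (c :: ·)

theorem splitDot_ne_nil (l : List Char) : splitDot l ≠ [] := by
  induction l with
  | nil => simp [splitDot]
  | cons c rest ih =>
      simp only [splitDot]
      split
      · simp
      · cases h : splitDot rest with
        | nil => exact absurd h ih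
        | cons a t => simp

theorem splitOn_go_dot (l : List Char) : ∀ (fuel : Nat) (cur : List Char) (acc : List (List Char)),
    l.length ≤ fuel →
    PySem.Chars.splitOn.go ['.'] fuel l cur acc
      = acc.reverse ++ (splitDot l).modifyHead (cur.reverse ++ ·) := by
  induction l with
  | nil =>
      intro fuel cur acc _
      cases fuel <;> simp [PySem.Chars.splitOn.go, splitDot]
  | cons c rest ih =>
      intro fuel cur acc hf
      cases fuel with
      | zero => simp at hf
      | succ f =>
          rw [PySem.Chars.splitOn.go]
          simp only [List.length_cons, Nat.succ_le_succ_iff] at hf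
          by_cases hc : c = '.'
          · subst hc
            have hp : List.isPrefixOf ['.'] ('.' :: rest) = true := by
              simp [List.isPrefixOf]
            rw [if_pos hp]
            simp only [List.length_cons, List.length_nil, List.drop_succ_cons, List.drop_zero]
            rw [ih f [] _ hf]
            simp only [splitDot]
            cases splitDot rest <;> simp
          · have hp : List.isPrefixOf ['.'] (c :: rest) = false := by
              have : ('.' == c) = false := by
                simp [beq_eq_false_iff_ne]; exact fun h => hc h.symm
              simp [List.isPrefixOf, this]
            rw [if_neg (by simp [hp])]
            rw [ih f (c :: cur) acc hf]
            simp only [splitDot, if_neg hc]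
            cases h : splitDot rest with
            | nil => exact absurd h (splitDot_ne_nil rest)
            | cons a t => simp

theorem splitOn_dot (l : List Char) : PySem.Chars.splitOn l ['.'] = splitDot l := by
  unfold PySem.Chars.splitOn
  rw [splitOn_go_dot l (l.length + 1) [] [] (by omega)]
  simp only [List.reverse_nil, List.nil_append]
  cases splitDot l <;> simp

-- the A-side check, applied to the split lists
def pvChk (ps ws : List (List Char)) : Bool :=
  if ps.length ≠ ws.length then false else pvLoopA (ps.zip ws)

theorem splitDot_takeWhile (l : List Char) :
    splitDot l = l.takeWhile (· ≠ '.') ::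
      (match l.dropWhile (· ≠ '.') with
       | [] => []
       | _ :: r => splitDot r) := by
  induction l with
  | nil => simp [splitDot]
  | cons c rest ih =>
      by_cases hc : c = '.'
      · subst hc
        simp [splitDot]
      · rw [List.takeWhile_cons_of_pos (by simp [hc]), List.dropWhile_cons_of_pos (by simp [hc])]
        simp only [splitDot, if_neg hc, ih, List.modifyHead]

theorem pvScan_eq (u w : List Char) : pvScan u w = pvChk (splitDot u) (splitDot w) := by
  rw [pvScan]
  rw [splitDot_takeWhile u, splitDot_takeWhile w]
  cases hu : u.dropWhile (· ≠ '.') with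
  | nil =>
      cases hw : w.dropWhile (· ≠ '.') with
      | nil => simp [pvChk, pvLoopA]
      | cons b wr =>
          have hne := splitDot_ne_nil wr
          rcases h : splitDot wr with _ | ⟨x, t⟩
          · exact absurd h hne
          · simp [pvChk, h]
  | cons a ur =>
      cases hw : w.dropWhile (· ≠ '.') with
      | nil =>
          have hne := splitDot_ne_nil ur
          rcases h : splitDot ur with _ | ⟨x, t⟩
          · exact absurd h hne
          · simp [pvChk, h]
      | cons b wr =>
          have ih := pvScan_eq ur wr
          by_cases hb : ¬(List.takeWhile (fun x => decide (x ≠ '.')) w).isEmpty = true ∧ List.takeWhile (fun x => decide (x ≠ '.')) w ≠ List.takeWhile (fun x => decide (x ≠ '.')) u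
          · simp only [pvChk, List.zip_cons_cons, List.length_cons, ne_eq,
              Nat.add_right_cancel_iff, pvLoopA, if_pos hb]
            split <;> rfl
          · simp only [ih, pvChk, List.zip_cons_cons, List.length_cons, ne_eq,
              Nat.add_right_cancel_iff, pvLoopA, if_neg hb]
termination_by u.length
decreasing_by
  have h := List.length_dropWhile_le (p := fun c => decide (c ≠ '.')) (l := u)
  rw [hu] at h
  simp at h
  omega

-- ===== VERDICT (by name: the statement is the Claim_ definition above) =====
theorem wildcard_match_spec : Claim_equal_wildcard_match := by
  intro uri wildcard _
  unfold Spec_wildcard_match wildcard_match wildcard_match_alt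
  rw [splitOn_dot, splitOn_dot, pvScan_eq]
  rfl
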